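-- pv_equiv track=rewrite | github.com/overloooooord/innit | pipeline/feature_extractor.py | _extract_activity_years_span
-- ===== SOURCE A (Python) =====
-- def _extract_activity_years_span(projects: list, olympiads: list) -> int:
--     """
--     How many years between first and last recorded activity.
--     """
--     years = []
--     for p in projects:
--         if "year" in p:
--             years.append(p["year"])
--     for o in olympiads:
--         if "year" in o:
--             years.append(o["year"])
--
--     if len(years) < 2:
--         return 0
--     return max(years) - min(years)
-- ===== SOURCE B (Python) =====
-- def _extract_activity_years_span(projects: list, olympiads: list) -> int:
--     """Sort the collected years; the span is the difference of the sorted endpoints."""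
--     ordered = sorted(d["year"] for d in projects + olympiads if "year" in d)
--     if len(ordered) < 2:
--         return 0
--     return ordered[-1] - ordered[0]
-- ===== Notes on version B (the rewrite author's own statement) =====
-- stated objective: alternative
-- what changed: B replaces A's two explicit loops plus max()/min() with one comprehension over the concatenated lists followed by a sort, reading the span off the sorted endpoints ordered[-1] - ordered[0].
import Mathlib
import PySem

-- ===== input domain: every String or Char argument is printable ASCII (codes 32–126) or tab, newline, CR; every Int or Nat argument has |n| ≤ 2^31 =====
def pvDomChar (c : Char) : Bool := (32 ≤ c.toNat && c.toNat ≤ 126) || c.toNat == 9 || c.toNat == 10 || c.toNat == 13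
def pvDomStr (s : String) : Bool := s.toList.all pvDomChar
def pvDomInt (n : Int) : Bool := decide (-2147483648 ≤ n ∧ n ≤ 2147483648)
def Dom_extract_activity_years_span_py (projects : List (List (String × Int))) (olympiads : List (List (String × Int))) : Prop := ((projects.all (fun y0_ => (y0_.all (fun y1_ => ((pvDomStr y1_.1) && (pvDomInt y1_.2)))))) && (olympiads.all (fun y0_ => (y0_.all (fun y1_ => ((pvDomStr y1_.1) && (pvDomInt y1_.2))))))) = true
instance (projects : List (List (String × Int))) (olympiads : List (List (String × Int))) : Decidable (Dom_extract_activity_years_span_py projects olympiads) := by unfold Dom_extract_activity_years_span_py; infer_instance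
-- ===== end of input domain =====

-- B replaces A's two loops + max()/min() with one comprehension over projects+olympiads, a sort, and the difference of the sorted endpoints.

-- ===== PORT A =====
-- loop body of both 'for' loops: if "year" in d: years.append(d["year"])
def pvYearsStep (years : List Int) (d : List (String × Int)) : List Int :=
  if (PySem.Dict.mk d).contains "year"
  then years ++ [((PySem.Dict.mk d).get? "year").getD 0]   -- getD default unreachable under the guard
  else years

def extract_activity_years_span_py (projects : List (List (String × Int))) (olympiads : List (List (String × Int))) : Int :=
  let years := olympiads.foldl pvYearsStep (projects.foldl pvYearsStep [])
  if years.length < 2 then 0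
  else
    match PySem.List.max? years (fun y => y), PySem.List.min? years (fun y => y) with
    | some mx, some mn => mx - mn
    | _, _ => 0   -- unreachable: years is nonempty here

-- ===== PORT B =====
-- the comprehension 'd["year"] for d in projects + olympiads if "year" in d' is exactly filterMap of the dict lookup
def extract_activity_years_span_py_alt (projects : List (List (String × Int))) (olympiads : List (List (String × Int))) : Int :=
  let ordered := PySem.List.sorted ((projects ++ olympiads).filterMap (fun d => (PySem.Dict.mk d).get? "year")) (fun y => y) false
  if ordered.length < 2 then 0
  else (PySem.List.pyGet? ordered (-1)).getD 0 - (PySem.List.pyGet? ordered 0).getD 0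

-- ===== PRECONDITION & SPEC =====
def Spec_extract_activity_years_span_py (projects : List (List (String × Int))) (olympiads : List (List (String × Int))) (out : Int) : Prop := out = extract_activity_years_span_py_alt projects olympiads
instance (projects : List (List (String × Int))) (olympiads : List (List (String × Int))) (out : Int) : Decidable (Spec_extract_activity_years_span_py projects olympiads out) := by unfold Spec_extract_activity_years_span_py; infer_instance

-- ===== CLAIM =====
def Claim_equal_extract_activity_years_span_py : Prop := ∀ (projects : List (List (String × Int))) (olympiads : List (List (String × Int))), Dom_extract_activity_years_span_py projects olympiads → Spec_extract_activity_years_span_py projects olympiads (extract_activity_years_span_py projects olympiads)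

-- ===== LEMMAS AND PROOFS =====

theorem pvYearsStep_eq (years : List Int) (d : List (String × Int)) :
    pvYearsStep years d = years ++ ((PySem.Dict.mk d).get? "year").toList := by
  unfold pvYearsStep
  rw [PySem.Dict.contains_eq_isSome_get?]
  cases h : (PySem.Dict.mk d).get? "year" <;> simp

theorem pvFoldl_years (l : List (List (String × Int))) (acc : List Int) :
    l.foldl pvYearsStep acc = acc ++ l.filterMap (fun d => (PySem.Dict.mk d).get? "year") := by
  induction l generalizing acc with
  | nil => simp
  | cons d t ih =>
    rw [List.foldl_cons, ih, pvYearsStep_eq, List.filterMap_cons]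
    cases h : (PySem.Dict.mk d).get? "year" <;> simp

-- head of sorted(ys) is min(ys)
theorem pvSorted_head_eq_min (x : Int) (t : List Int) {h : Int} {t' : List Int}
    (hs : PySem.List.sorted (x :: t) (fun y => y) false = h :: t') :
    h = List.foldl min x t := by
  have hmin := PySem.List.min?_id_cons x t
  have hmem_h : h ∈ (x :: t) := by
    have : h ∈ PySem.List.sorted (x :: t) (fun y => y) false := by rw [hs]; simp
    exact (PySem.List.mem_sorted _ _ _ _).mp this
  have h1 : List.foldl min x t ≤ h := PySem.List.min?_isMin hmin h hmem_h
  have h2 : h ≤ List.foldl min x t :=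
    PySem.List.key_head_sorted_le _ _ hs _ (PySem.List.min?_mem hmin)
  omega

-- last of sorted(ys) is max(ys)
theorem pvSorted_last_eq_max (x : Int) (t : List Int)
    (hne : PySem.List.sorted (x :: t) (fun y => y) false ≠ []) :
    (PySem.List.sorted (x :: t) (fun y => y) false).getLast hne = List.foldl max x t := by
  have hmax := PySem.List.max?_id_cons x t
  have hlast_mem : (PySem.List.sorted (x :: t) (fun y => y) false).getLast hne ∈ (x :: t) :=
    (PySem.List.mem_sorted _ _ _ _).mp (List.getLast_mem hne)
  have h1 : (PySem.List.sorted (x :: t) (fun y => y) false).getLast hne ≤ List.foldl max x t :=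
    PySem.List.max?_isMax hmax _ hlast_mem
  have hmem_m : List.foldl max x t ∈ PySem.List.sorted (x :: t) (fun y => y) false :=
    (PySem.List.mem_sorted _ _ _ _).mpr (PySem.List.max?_mem hmax)
  obtain ⟨p, hp, hpe⟩ := List.mem_iff_getElem.mp hmem_m
  have h2 : List.foldl max x t ≤ (PySem.List.sorted (x :: t) (fun y => y) false).getLast hne := by
    rw [List.getLast_eq_getElem]
    rw [← hpe]
    exact PySem.List.sorted_id_getElem_mono (x :: t) (by omega) (by omega)
  omega

-- the span computed from max/min equals the span read off the sorted endpoints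
theorem pvSpan_eq (ys : List Int) :
    (if ys.length < 2 then (0 : Int)
     else
       match PySem.List.max? ys (fun y => y), PySem.List.min? ys (fun y => y) with
       | some mx, some mn => mx - mn
       | _, _ => 0)
    = (if (PySem.List.sorted ys (fun y => y) false).length < 2 then (0 : Int)
       else (PySem.List.pyGet? (PySem.List.sorted ys (fun y => y) false) (-1)).getD 0
            - (PySem.List.pyGet? (PySem.List.sorted ys (fun y => y) false) 0).getD 0) := by
  rw [PySem.List.length_sorted]
  by_cases hlen : ys.length < 2
  · rw [if_pos hlen, if_pos hlen]
  · rw [if_neg hlen, if_neg hlen]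
    match ys, hlen with
    | x :: t, hlen =>
      rw [PySem.List.max?_id_cons, PySem.List.min?_id_cons]
      have hne : PySem.List.sorted (x :: t) (fun y => y) false ≠ [] := by
        intro h
        have hl := PySem.List.length_sorted (x :: t) (fun y : Int => y) false
        rw [h] at hl
        simp at hl
      obtain ⟨h0, t0, hs⟩ : ∃ h0 t0, PySem.List.sorted (x :: t) (fun y => y) false = h0 :: t0 := by
        cases hh : PySem.List.sorted (x :: t) (fun y => y) false with
        | nil => exact absurd hh hne
        | cons a b => exact ⟨a, b, rfl⟩
      rw [PySem.List.pyGet?_neg_one, PySem.List.pyGet?_zero,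
          List.getLast?_eq_some_getLast hne, pvSorted_last_eq_max x t hne]
      rw [hs]
      simp [pvSorted_head_eq_min x t hs]

-- ===== VERDICT =====
theorem extract_activity_years_span_py_spec : Claim_equal_extract_activity_years_span_py := by
  intro projects olympiads _
  unfold Spec_extract_activity_years_span_py
  unfold extract_activity_years_span_py extract_activity_years_span_py_alt
  rw [pvFoldl_years, pvFoldl_years, List.nil_append, ← List.filterMap_append]
  exact pvSpan_eq _
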